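-- pv_equiv track=rewrite | github.com/dmlgus1922/AlgorithmSolved | 엘리스 문제은행/너가 왜 거기서 나와.py | answer
-- ===== SOURCE A (Python) =====
-- def answer(n):
--     check_n = str(n)
--     num_str = ''
--     for i in range(1,n+1):
--         i = str(i)
--         num_str += i
--     if check_n in num_str:
--         return num_str.find(check_n)
-- ===== SOURCE B (Python) =====
-- def answer(n):
--     s = str(n)
--     k = len(s)
--     tail = ''
--     pos = 0
--     for i in range(1, n + 1):
--         chunk = tail + str(i)
--         j = chunk.find(s)
--         if j != -1:
--             return pos + j
--         drop = max(0, len(chunk) - (k - 1))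
--         pos += drop
--         tail = chunk[drop:]
--     return -1
-- ===== Notes on version B (the rewrite author's own statement) =====
-- stated objective: alternative
-- what changed: B streams the concatenation of str(1..n) through a sliding window (last len(str(n))-1 chars kept as state) and searches each small tail+block chunk with early return at the first hit, instead of A's build-the-whole-string-then-one-global-find; a global index counter makes the window hit equal the global first index.
-- outside the precondition, e.g. on answer(0): A returns None, B returns -1; on answer(-1): A returns None, B returns -1
import Mathlib
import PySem

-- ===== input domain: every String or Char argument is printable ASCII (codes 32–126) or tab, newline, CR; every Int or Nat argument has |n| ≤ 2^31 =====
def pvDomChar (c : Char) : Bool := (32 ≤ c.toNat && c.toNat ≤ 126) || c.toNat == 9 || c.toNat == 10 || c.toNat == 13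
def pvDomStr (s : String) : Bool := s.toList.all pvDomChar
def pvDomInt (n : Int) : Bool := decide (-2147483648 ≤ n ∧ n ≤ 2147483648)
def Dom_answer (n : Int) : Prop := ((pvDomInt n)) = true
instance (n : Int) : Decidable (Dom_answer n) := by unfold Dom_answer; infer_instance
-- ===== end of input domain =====

-- B replaces A's build-the-whole-concatenation-then-one-global-find by a streaming search over a
-- sliding window of the last len(str(n))-1 characters plus the current block, returning at the first hit
-- (same return value; 'alternative' objective — not claimed faster).
-- Strings are ported on the List Char side (PySem.Chars/PySem.Int.toChars), which is exact for str(i), +, 'in', find and slicing.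

-- ===== PORT A =====
def answer (n : Int) : Int :=
  let check_n := PySem.Int.toChars n
  let num_str := (PySem.List.pyRange 1 (n + 1) 1).foldl (fun acc i => acc ++ PySem.Int.toChars i) []
  if PySem.Chars.isIn check_n num_str then PySem.Chars.find num_str check_n
  else 0  -- Python falls off the function and returns None here (only when n ≤ 0); excluded by Pre_answer

-- ===== PORT B =====
-- the for-loop of Source B with early return, as structural recursion over the range list; state = (tail, pos)
def bGo (s : List Char) (k : Int) : List Int → List Char → Int → Int
  | [], _, _ => -1
  | i :: rest, tail, pos =>
    let chunk := tail ++ PySem.Int.toChars i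
    let j := PySem.Chars.find chunk s
    if j ≠ -1 then pos + j
    else
      let dr := max 0 (PySem.List.len chunk - (k - 1))
      bGo s k rest (PySem.List.slice chunk (some dr) none) (pos + dr)

def answer_alt (n : Int) : Int :=
  let s := PySem.Int.toChars n
  let k := PySem.List.len s
  bGo s k (PySem.List.pyRange 1 (n + 1) 1) [] 0

-- ===== PRECONDITION & SPEC =====
-- Pre_ excludes n ≤ 0: there the loop body never runs, 'check_n in num_str' is false and the Python A
-- falls off the end returning None, which is not a value of the declared int type (B returns -1 there).
def Pre_answer (n : Int) : Prop := 1 ≤ n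
instance (n : Int) : Decidable (Pre_answer n) := by unfold Pre_answer; infer_instance
def pvWitness_answer : Int := (12)
def Spec_answer (n : Int) (out : Int) : Prop := out = answer_alt n
instance (n : Int) (out : Int) : Decidable (Spec_answer n out) := by unfold Spec_answer; infer_instance

-- ===== CLAIM (what is proved, stated in full; the proofs are below) =====
def Claim_equal_answer : Prop := ∀ (n : Int), Dom_answer n → Pre_answer n → Spec_answer n (answer n)

-- ===== LEMMAS AND PROOFS =====

-- str(i) is never the empty string
lemma toDigitsCore_ne_nil (b : Nat) : ∀ (fuel n : Nat) (ds : List Char), ds ≠ [] →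
    Nat.toDigitsCore b fuel n ds ≠ [] := by
  intro fuel
  induction fuel with
  | zero => intro n ds h; simpa [Nat.toDigitsCore] using h
  | succ f ih =>
    intro n ds h
    simp only [Nat.toDigitsCore]
    split
    · simp
    · exact ih _ _ (by simp)

lemma toChars_ne_nil (m : Int) : PySem.Int.toChars m ≠ [] := by
  unfold PySem.Int.toChars
  split
  · simp
  · show Nat.toDigitsCore 10 _ _ [] ≠ []
    simp only [Nat.toDigitsCore]
    split
    · simp
    · exact toDigitsCore_ne_nil 10 _ _ _ (by simp)

-- a prefix of A ++ B that fits inside A is a prefix of A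
lemma prefix_append_left {s A B : List Char} (h : s <+: A ++ B) (hlen : s.length ≤ A.length) :
    s <+: A := by
  have h1 : s = (A ++ B).take s.length := List.prefix_iff_eq_take.1 h
  rw [List.take_append, Nat.sub_eq_zero_of_le hlen, List.take_zero, List.append_nil] at h1
  rw [h1]
  exact List.take_prefix s.length A

-- find X s = q whenever s occurs at q and at no smaller index
lemma find_eq_of (X s : List Char) (q : Nat) (h1 : s <+: X.drop q)
    (h2 : ∀ i < q, ¬ s <+: X.drop i) : PySem.Chars.find X s = (q : Int) := by
  have hinf : s <:+: X := h1.isInfix.trans (List.drop_suffix q X).isInfix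
  have hnn : 0 ≤ PySem.Chars.find X s := (PySem.Chars.find_nonneg_iff X s).2 hinf
  obtain ⟨hocc, hmin⟩ := PySem.Chars.find_spec hnn
  have hge : q ≤ (PySem.Chars.find X s).toNat := by
    by_contra hlt
    exact h2 _ (by omega) hocc
  have hle : (PySem.Chars.find X s).toNat ≤ q := by
    by_contra hlt
    exact hmin q (by omega) h1
  omega

-- an occurrence inside X is an occurrence inside X ++ Y at the same index
lemma occ_append {s X Y : List Char} {q : Nat} (hq : q ≤ X.length) (h : s <+: X.drop q) :
    s <+: (X ++ Y).drop q := by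
  rw [List.drop_append_of_le_length hq]
  exact List.prefix_append_of_prefix h

-- appending to the haystack does not move the first occurrence
lemma find_append_stable (s X Y : List Char) (h : s <:+: X) :
    PySem.Chars.find (X ++ Y) s = PySem.Chars.find X s := by
  have hnn : 0 ≤ PySem.Chars.find X s := (PySem.Chars.find_nonneg_iff X s).2 h
  obtain ⟨hocc, hmin⟩ := PySem.Chars.find_spec hnn
  set q := (PySem.Chars.find X s).toNat with hqdef
  have hqlen : q + s.length ≤ X.length := by
    have := h.length_le
    have h1 := hocc.length_le
    simp only [List.length_drop] at h1
    have : q ≤ X.length := by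
      have := PySem.Chars.find_le_length X s
      omega
    omega
  have : PySem.Chars.find (X ++ Y) s = (q : Int) := by
    apply find_eq_of
    · exact occ_append (by omega) hocc
    · intro i hi hocc'
      apply hmin i hi
      have hfit : s.length ≤ (X.drop i).length := by simp; omega
      rw [List.drop_append_of_le_length (by omega)] at hocc'
      exact prefix_append_left hocc' hfit
  omega

-- every occurrence of s in P ++ b starts at index ≥ |P| - (|s| - 1), provided s does not occur in P
lemma occ_shift {s P b : List Char} (hP : ¬ s <:+: P) {q : Nat}
    (h : s <+: (P ++ b).drop q) : P.length - (s.length - 1) ≤ q := by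
  by_contra hlt
  push Not at hlt
  have hs1 : 1 ≤ s.length := by
    rcases Nat.eq_zero_or_pos s.length with h0 | h1
    · exact absurd (by simp [List.length_eq_zero_iff.1 h0]) hP
    · exact h1
  have hqP : q + s.length ≤ P.length := by omega
  rw [List.drop_append_of_le_length (by omega)] at h
  have h' : s <+: P.drop q := prefix_append_left h (by simp; omega)
  exact hP (h'.isInfix.trans (List.drop_suffix q P).isInfix)

-- THE WINDOW LEMMA: searching P ++ b when s does not occur in P is searching (last |s|-1 chars of P) ++ b
lemma find_window (s P b : List Char) (hP : ¬ s <:+: P) :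
    PySem.Chars.find (P ++ b) s =
      (if PySem.Chars.isIn s (P.drop (P.length - (s.length - 1)) ++ b) then
        ((P.length - (s.length - 1) : Nat) : Int) + PySem.Chars.find (P.drop (P.length - (s.length - 1)) ++ b) s
      else -1) := by
  set d := P.length - (s.length - 1) with hd
  have hdP : d ≤ P.length := by omega
  have hshift : ∀ q' : Nat, (P ++ b).drop (d + q') = (P.drop d ++ b).drop q' := by
    intro q'
    rw [← List.drop_drop, List.drop_append_of_le_length hdP]
  by_cases hin : PySem.Chars.isIn s (P.drop d ++ b) = true
  · rw [if_pos hin]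
    have hinf : s <:+: P.drop d ++ b := (PySem.Chars.isIn_iff_infix _ _).1 hin
    have hnn : 0 ≤ PySem.Chars.find (P.drop d ++ b) s := (PySem.Chars.find_nonneg_iff _ _).2 hinf
    obtain ⟨hocc, hmin⟩ := PySem.Chars.find_spec hnn
    set j := (PySem.Chars.find (P.drop d ++ b) s).toNat with hj
    have : PySem.Chars.find (P ++ b) s = ((d + j : Nat) : Int) := by
      apply find_eq_of
      · rw [hshift j]; exact hocc
      · intro i hi hocc'
        have hge : d ≤ i := occ_shift hP hocc'
        have : s <+: (P.drop d ++ b).drop (i - d) := by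
          rw [← hshift (i - d), Nat.add_sub_cancel' hge]; exact hocc'
        exact hmin (i - d) (by omega) this
    omega
  · rw [if_neg hin]
    rw [PySem.Chars.find_eq_neg_one_iff]
    intro hinf
    obtain ⟨q, hq⟩ := (PySem.Chars.exists_prefix_drop_iff_isIn s (P ++ b)).2
      ((PySem.Chars.isIn_iff_infix _ _).2 hinf)
    have hge : d ≤ q := occ_shift hP hq
    have : s <+: (P.drop d ++ b).drop (q - d) := by
      rw [← hshift (q - d), Nat.add_sub_cancel' hge]; exact hq
    exact hin ((PySem.Chars.exists_prefix_drop_iff_isIn s _).1 ⟨q - d, this⟩)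

-- the loop of B computes the global first-occurrence search, by the window invariant
lemma bGo_eq (s : List Char) (hs : s ≠ []) (bs : List Int) (P : List Char) (hP : ¬ s <:+: P) :
    bGo s (s.length : Int) bs (P.drop (P.length - (s.length - 1)))
      ((P.length - (s.length - 1) : Nat) : Int)
    = (if PySem.Chars.isIn s (P ++ bs.flatMap PySem.Int.toChars) then
        PySem.Chars.find (P ++ bs.flatMap PySem.Int.toChars) s else -1) := by
  induction bs generalizing P with
  | nil =>
    simp only [bGo, List.flatMap_nil, List.append_nil]
    rw [if_neg (by simpa [PySem.Chars.isIn_iff_infix] using hP)]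
  | cons i rest ih =>
    have hs1 : 1 ≤ s.length := List.length_pos_of_ne_nil hs
    set d := P.length - (s.length - 1) with hd
    have hdP : d ≤ P.length := by omega
    set b := PySem.Int.toChars i with hb
    have hwin := find_window s P b hP
    rw [← hd] at hwin
    simp only [bGo]
    by_cases hfound : PySem.Chars.find (P.drop d ++ b) s ≠ -1
    · rw [if_pos hfound]
      have hin : PySem.Chars.isIn s (P.drop d ++ b) = true := by
        rw [PySem.Chars.isIn_iff_infix, ← PySem.Chars.find_ne_neg_one_iff]; exact hfound
      rw [if_pos hin] at hwin
      have hinfPb : s <:+: P ++ b := by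
        rw [← PySem.Chars.find_nonneg_iff, hwin]
        have := (PySem.Chars.find_nonneg_iff (P.drop d ++ b) s).2
          ((PySem.Chars.isIn_iff_infix _ _).1 hin)
        omega
      have hstable : PySem.Chars.find ((P ++ b) ++ rest.flatMap PySem.Int.toChars) s
          = PySem.Chars.find (P ++ b) s := find_append_stable s _ _ hinfPb
      have hinall : PySem.Chars.isIn s (P ++ (i :: rest).flatMap PySem.Int.toChars) = true := by
        rw [PySem.Chars.isIn_iff_infix, List.flatMap_cons, ← hb, ← List.append_assoc]
        exact hinfPb.trans (List.prefix_append _ _).isInfix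
      rw [if_pos hinall, List.flatMap_cons, ← hb, ← List.append_assoc, hstable, hwin]
    · rw [if_neg hfound]
      push Not at hfound
      have hnin : PySem.Chars.isIn s (P.drop d ++ b) = false := by
        rw [← Bool.not_eq_true, PySem.Chars.isIn_iff_infix, ← PySem.Chars.find_eq_neg_one_iff]
        exact hfound
      rw [if_neg (by simp [hnin])] at hwin
      have hP' : ¬ s <:+: P ++ b := by
        rw [← PySem.Chars.find_eq_neg_one_iff]; exact hwin
      -- the new state is the canonical window state for P ++ b
      have hlen : (P.drop d ++ b).length = P.length - d + b.length := by simp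
      set dr := max 0 (PySem.List.len (P.drop d ++ b) - ((s.length : Int) - 1)) with hdr
      have hdrval : dr = (((P ++ b).length - (s.length - 1) - d : Nat) : Int) := by
        rw [hdr, PySem.List.len_eq, hlen]
        simp only [List.length_append]
        rcases le_total (0 : Int) ((P.length - d + b.length : Nat) - ((s.length : Int) - 1)) with h | h
        · rw [max_eq_right h]; push_cast; omega
        · rw [max_eq_left h]; omega
      have hdrnn : 0 ≤ dr := le_max_left _ _
      have hdrnat : dr.toNat = (P ++ b).length - (s.length - 1) - d := by
        rw [hdrval]; simp
      have htail : PySem.List.slice (P.drop d ++ b) (some dr) none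
          = (P ++ b).drop ((P ++ b).length - (s.length - 1)) := by
        rw [PySem.List.slice_from _ hdrnn, ← List.drop_append_of_le_length hdP,
          List.drop_drop, hdrnat]
        congr 1
        simp only [List.length_append] at *
        omega
      have hpos : ((P.length - (s.length - 1) : Nat) : Int) + dr
          = (((P ++ b).length - (s.length - 1) : Nat) : Int) := by
        rw [hdrval]
        simp only [List.length_append]
        omega
      rw [htail, hpos, ih (P ++ b) hP']
      rw [List.flatMap_cons, ← hb, ← List.append_assoc]

-- str(n) is a suffix (hence infix) of the concatenation of str(1) .. str(n)
lemma toChars_infix_concat (n : Int) (hn : 1 ≤ n) :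
    PySem.Int.toChars n <:+: (PySem.List.pyRange 1 (n + 1) 1).flatMap PySem.Int.toChars := by
  rw [PySem.List.pyRange_one_succ_right hn, List.flatMap_append]
  simp only [List.flatMap_cons, List.flatMap_nil, List.append_nil]
  exact (List.suffix_append _ _).isInfix

-- ===== VERDICT (by name: the statement is the Claim_ definition above) =====
theorem answer_spec : Claim_equal_answer := by
  intro n _ hpre
  unfold Spec_answer answer answer_alt
  have hs : PySem.Int.toChars n ≠ [] := toChars_ne_nil n
  have hfold : (PySem.List.pyRange 1 (n + 1) 1).foldl
      (fun acc i => acc ++ PySem.Int.toChars i) []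
      = (PySem.List.pyRange 1 (n + 1) 1).flatMap PySem.Int.toChars := by
    simpa using PySem.List.foldl_append_eq_flatMap (PySem.Int.toChars) (PySem.List.pyRange 1 (n + 1) 1) []
  have hinf := toChars_infix_concat n hpre
  have hb := bGo_eq (PySem.Int.toChars n) hs (PySem.List.pyRange 1 (n + 1) 1) [] (by
    intro h; exact hs (List.eq_nil_of_infix_nil h))
  simp only [List.drop_nil, List.length_nil, Nat.zero_sub, Nat.cast_zero, List.nil_append] at hb
  rw [hfold, if_pos ((PySem.Chars.isIn_iff_infix _ _).2 hinf)]
  show _ = bGo (PySem.Int.toChars n) (PySem.List.len (PySem.Int.toChars n))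
    (PySem.List.pyRange 1 (n + 1) 1) [] 0
  rw [PySem.List.len_eq, hb, if_pos ((PySem.Chars.isIn_iff_infix _ _).2 hinf)]
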